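-- pv_equiv track=rewrite | github.com/Liwu-di/DASTNet | funcs.py | yield_8_near
-- ===== SOURCE A (Python) =====
-- def yield_8_near(i, ranges):
--     """
--     产生i的8邻域，i，ranges都是元组或者可下标访问的元素，
--     :param i:
--     :param ranges:
--     :return:
--     """
--     if i[0] - 1 >= 0 and i[1] - 1 >= 0 and i[0] + 1 < ranges[0] and i[1] + 1 < ranges[1]:
--         for k in [-1, 0, 1]:
--             for p in [-1, 0, 1]:
--                 yield i[0] + k, i[1] + p
--     elif i == (0, 0):
--         for k in [0, 1, 2]:
--             for p in [0, 1, 2]: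
--                 yield i[0] + k, i[1] + p
--     elif i == (ranges[0] - 1, 0):
--         for k in [-2, -1, 0]:
--             for p in [0, 1, 2]:
--                 yield i[0] + k, i[1] + p
--     elif i == (0, ranges[1] - 1):
--         for k in [0, 1, 2]:
--             for p in [-2, -1, 0]:
--                 yield i[0] + k, i[1] + p
--     elif i == (ranges[0] - 1, ranges[1] - 1):
--         for k in [-2, -1, 0]:
--             for p in [-2, -1, 0]:
--                 yield i[0] + k, i[1] + p
--     elif i[0] == 0 and 0 < i[1] < ranges[1] - 1:
--         for k in [0, 1, 2]:
--             for p in [-1, 0, 1]: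
--                 yield i[0] + k, i[1] + p
--     elif 0 < i[0] < ranges[0] - 1 and i[1] == 0:
--         for k in [-1, 0, 1]:
--             for p in [0, 1, 2]:
--                 yield i[0] + k, i[1] + p
--     elif i[0] == ranges[0] - 1 and 0 < i[1] < ranges[1] - 1:
--         for k in [-2, -1, 0]:
--             for p in [-1, 0, 1]:
--                 yield i[0] + k, i[1] + p
--     elif 0 < i[0] < ranges[0] - 1 and i[1] == ranges[1] - 1:
--         for k in [-1, 0, 1]:
--             for p in [-2, -1, 0]:
--                 yield i[0] + k, i[1] + p
-- ===== SOURCE B (Python) =====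
-- def yield_8_near(i, ranges):
--     x, y = i[0], i[1]
--     h, w = ranges[0], ranges[1]
--     if 0 <= x < h and 0 <= y < w:
--         bx = min(x - 1, h - 3) if x else 0
--         by = min(y - 1, w - 3) if y else 0
--         for a in range(bx, bx + 3):
--             for b in range(by, by + 3):
--                 yield a, b
-- ===== Notes on version B (the rewrite author's own statement) =====
-- stated objective: simpler
-- what changed: Replaced A's nine-branch case enumeration over explicit offset lists with a single bounds check plus a min-clamped window origin, emitting the absolute 3x3 block with two range loops.
-- intended difference: On grids with a non-positive dimension (ranges[0] <= 0 or ranges[1] <= 0) whose coordinates still match a boundary/interior pattern (e.g. i == (0,0)), A yields a 3x3 block of cells of a grid that has no cells at all, while B yields nothing, the intended result for an empty grid. — e.g. on yield_8_near((0, 0), (0, 0)): A returns [(0, 0), (0, 1), (0, 2), (1, 0), (1, 1), (1, 2), (2, 0), (2, 1), (2, 2)], B returns []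
import Mathlib
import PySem

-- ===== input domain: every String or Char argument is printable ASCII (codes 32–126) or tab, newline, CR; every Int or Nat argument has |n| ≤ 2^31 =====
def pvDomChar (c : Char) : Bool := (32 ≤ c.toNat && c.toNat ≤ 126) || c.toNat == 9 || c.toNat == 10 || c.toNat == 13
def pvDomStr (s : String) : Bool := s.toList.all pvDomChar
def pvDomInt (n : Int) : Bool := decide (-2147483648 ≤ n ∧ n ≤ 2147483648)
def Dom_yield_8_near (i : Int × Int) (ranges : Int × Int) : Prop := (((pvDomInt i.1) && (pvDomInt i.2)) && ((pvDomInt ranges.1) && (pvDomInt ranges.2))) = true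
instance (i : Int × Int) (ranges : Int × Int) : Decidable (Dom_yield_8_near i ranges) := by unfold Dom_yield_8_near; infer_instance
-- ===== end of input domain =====

-- B replaces A's nine-branch case enumeration with one bounds check plus a min-clamped
-- window origin; on degenerate grids (a non-positive range dimension) A yields a 3x3 block
-- of non-existent cells and B yields nothing (the intended value), stated as D_ below.


-- ===== PORT A =====
-- literal transliteration of A's if/elif chain; each nested 'yield' loop is a flatMap/map
def yield_8_near (i : Int × Int) (ranges : Int × Int) : List (Int × Int) :=
  if i.1 - 1 ≥ 0 ∧ i.2 - 1 ≥ 0 ∧ i.1 + 1 < ranges.1 ∧ i.2 + 1 < ranges.2 then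
    ([-1, 0, 1] : List Int).flatMap (fun k => ([-1, 0, 1] : List Int).map (fun p => (i.1 + k, i.2 + p)))
  else if i = (0, 0) then
    ([0, 1, 2] : List Int).flatMap (fun k => ([0, 1, 2] : List Int).map (fun p => (i.1 + k, i.2 + p)))
  else if i = (ranges.1 - 1, 0) then
    ([-2, -1, 0] : List Int).flatMap (fun k => ([0, 1, 2] : List Int).map (fun p => (i.1 + k, i.2 + p)))
  else if i = (0, ranges.2 - 1) then
    ([0, 1, 2] : List Int).flatMap (fun k => ([-2, -1, 0] : List Int).map (fun p => (i.1 + k, i.2 + p)))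
  else if i = (ranges.1 - 1, ranges.2 - 1) then
    ([-2, -1, 0] : List Int).flatMap (fun k => ([-2, -1, 0] : List Int).map (fun p => (i.1 + k, i.2 + p)))
  else if i.1 = 0 ∧ 0 < i.2 ∧ i.2 < ranges.2 - 1 then
    ([0, 1, 2] : List Int).flatMap (fun k => ([-1, 0, 1] : List Int).map (fun p => (i.1 + k, i.2 + p)))
  else if 0 < i.1 ∧ i.1 < ranges.1 - 1 ∧ i.2 = 0 then
    ([-1, 0, 1] : List Int).flatMap (fun k => ([0, 1, 2] : List Int).map (fun p => (i.1 + k, i.2 + p)))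
  else if i.1 = ranges.1 - 1 ∧ 0 < i.2 ∧ i.2 < ranges.2 - 1 then
    ([-2, -1, 0] : List Int).flatMap (fun k => ([-1, 0, 1] : List Int).map (fun p => (i.1 + k, i.2 + p)))
  else if 0 < i.1 ∧ i.1 < ranges.1 - 1 ∧ i.2 = ranges.2 - 1 then
    ([-1, 0, 1] : List Int).flatMap (fun k => ([-2, -1, 0] : List Int).map (fun p => (i.1 + k, i.2 + p)))
  else []

-- ===== PORT B =====
-- Source B: bounds check, min-clamped window origin (bx, by), absolute 3x3 block via two ranges
def yield_8_near_alt (i : Int × Int) (ranges : Int × Int) : List (Int × Int) :=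
  if 0 ≤ i.1 ∧ i.1 < ranges.1 ∧ 0 ≤ i.2 ∧ i.2 < ranges.2 then
    let bx : Int := if i.1 ≠ 0 then min (i.1 - 1) (ranges.1 - 3) else 0
    let by_ : Int := if i.2 ≠ 0 then min (i.2 - 1) (ranges.2 - 3) else 0
    (PySem.List.pyRange bx (bx + 3) 1).flatMap (fun a =>
      (PySem.List.pyRange by_ (by_ + 3) 1).map (fun b => (a, b)))
  else []

-- ===== PRECONDITION & SPEC =====
-- On grids with a non-positive dimension whose coordinates still match one of A's
-- boundary/interior patterns, A yields a 3x3 block of cells of a grid that has no cells,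
-- while B yields nothing — the intended result for an empty grid.
def D_yield_8_near (i : Int × Int) (ranges : Int × Int) : Prop :=
  (ranges.1 ≤ 0 ∨ ranges.2 ≤ 0) ∧
  (i.1 = 0 ∨ i.1 = ranges.1 - 1 ∨ (0 < i.1 ∧ i.1 < ranges.1 - 1)) ∧
  (i.2 = 0 ∨ i.2 = ranges.2 - 1 ∨ (0 < i.2 ∧ i.2 < ranges.2 - 1))
instance (i : Int × Int) (ranges : Int × Int) : Decidable (D_yield_8_near i ranges) := by unfold D_yield_8_near; infer_instance

def Spec_yield_8_near (i : Int × Int) (ranges : Int × Int) (out : List (Int × Int)) : Prop := ¬ D_yield_8_near i ranges → out = yield_8_near_alt i ranges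
instance (i : Int × Int) (ranges : Int × Int) (out : List (Int × Int)) : Decidable (Spec_yield_8_near i ranges out) := by unfold Spec_yield_8_near; infer_instance

def pvDiffWitness_yield_8_near : (Int × Int) × (Int × Int) := ((0, 0), (0, 0))
def pvDiffWitnessOut_yield_8_near : (List (Int × Int)) × (List (Int × Int)) :=
  ([(0, 0), (0, 1), (0, 2), (1, 0), (1, 1), (1, 2), (2, 0), (2, 1), (2, 2)], [])

-- ===== CLAIM (what is proved, stated in full; the proofs are below) =====
def Claim_unchanged_yield_8_near : Prop := ∀ (i : Int × Int) (ranges : Int × Int), Dom_yield_8_near i ranges → Spec_yield_8_near i ranges (yield_8_near i ranges)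
def Claim_changed_yield_8_near : Prop := Dom_yield_8_near (pvDiffWitness_yield_8_near.1) (pvDiffWitness_yield_8_near.2) ∧ D_yield_8_near (pvDiffWitness_yield_8_near.1) (pvDiffWitness_yield_8_near.2) ∧ yield_8_near (pvDiffWitness_yield_8_near.1) (pvDiffWitness_yield_8_near.2) = pvDiffWitnessOut_yield_8_near.1 ∧ yield_8_near_alt (pvDiffWitness_yield_8_near.1) (pvDiffWitness_yield_8_near.2) = pvDiffWitnessOut_yield_8_near.2 ∧ pvDiffWitnessOut_yield_8_near.1 ≠ pvDiffWitnessOut_yield_8_near.2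
def Claim_exact_yield_8_near : Prop := ∀ (i : Int × Int) (ranges : Int × Int), Dom_yield_8_near i ranges → D_yield_8_near i ranges → yield_8_near i ranges ≠ yield_8_near_alt i ranges

-- ===== LEMMAS AND PROOFS =====
-- range(b, b+3) is the three consecutive integers starting at b
theorem pyRange3 (b : Int) : PySem.List.pyRange b (b + 3) 1 = [b, b + 1, b + 2] := by
  rw [PySem.List.pyRange_one_cons (by omega), PySem.List.pyRange_one_cons (by omega),
      PySem.List.pyRange_one_cons (by omega), PySem.List.pyRange_one_eq_nil (by omega)]
  norm_num
  omega

-- ===== VERDICT (by name: the statement is the Claim_ definition above) =====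
set_option maxHeartbeats 4000000 in
theorem yield_8_near_spec : Claim_unchanged_yield_8_near := by
  intro ⟨i1, i2⟩ ⟨r1, r2⟩ _ hD
  unfold D_yield_8_near at hD
  dsimp only at hD
  simp only [yield_8_near, yield_8_near_alt, pyRange3, Prod.mk.injEq]
  by_cases hr : 1 ≤ r1 ∧ 1 ≤ r2
  · clear hD
    obtain ⟨hr1, hr2⟩ := hr
    split_ifs <;>
      first
        | rfl
        | (simp only [List.flatMap_cons, List.flatMap_nil, List.map_cons, List.map_nil,
            List.append_nil, List.cons_append, List.nil_append, List.cons.injEq,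
            Prod.mk.injEq, and_true]
           omega)
  · have hbad : r1 ≤ 0 ∨ r2 ≤ 0 := by omega
    have hn : ¬(i1 = 0 ∨ i1 = r1 - 1 ∨ (0 < i1 ∧ i1 < r1 - 1)) ∨
        ¬(i2 = 0 ∨ i2 = r2 - 1 ∨ (0 < i2 ∧ i2 < r2 - 1)) := by
      by_contra hc
      push Not at hc
      exact hD ⟨hbad, hc.1, hc.2⟩
    clear hD
    rcases hn with hn | hn <;> split_ifs <;> first | rfl | (exfalso; omega)

set_option maxHeartbeats 1000000 in
set_option maxRecDepth 4096 in
theorem yield_8_near_changed : Claim_changed_yield_8_near := by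
  unfold Claim_changed_yield_8_near; decide

set_option maxHeartbeats 4000000 in
theorem yield_8_near_tight : Claim_exact_yield_8_near := by
  intro ⟨i1, i2⟩ ⟨r1, r2⟩ _ hD
  obtain ⟨hr, hx, hy⟩ := hD
  dsimp only at hr hx hy
  simp only [yield_8_near, yield_8_near_alt, pyRange3, Prod.mk.injEq]
  rw [if_neg (show ¬(0 ≤ i1 ∧ i1 < r1 ∧ 0 ≤ i2 ∧ i2 < r2) by omega)]
  rcases hx with hx | hx | hx <;> rcases hy with hy | hy | hy <;>
    split_ifs <;> first | (exfalso; omega) | simp
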